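-- pv_equiv track=rewrite | github.com/lmartin5/BookThickness | BookThickness/Permutations.py | remove_flip_elements
-- ===== SOURCE A (Python) =====
-- def find_and_remove_flip(line, lines):
--     reverse = line[::-1]
--     try:
--         del lines[reverse]
--     except:
--         return
--
-- def remove_flip_elements(perms):
--     perms_dict = store_perms_in_dict(perms)
--     count = 0
--     for perm_value in list(perms_dict):
--         if perm_value in perms_dict:
--             find_and_remove_flip(perm_value, perms_dict)
--             count = count + 1
--     perms = list(perms_dict.values())
--     return perms
--
-- def store_perms_in_dict(perms):
--     new_perms = dict([])
--     for perm in perms: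
--         new_perms[perm] = perm
--     return new_perms
-- ===== SOURCE B (Python) =====
-- def remove_flip_elements(perms):
--     seen = set()
--     result = []
--     for perm in dict.fromkeys(perms):
--         r = perm[::-1]
--         if r == perm or r in seen:
--             continue
--         seen.add(perm)
--         result.append(perm)
--     return result
-- ===== Notes on version B (the rewrite author's own statement) =====
-- stated objective: simpler
-- what changed: Replaces A's build-a-dict-then-prune-it-by-deleting-reverses (with values() read at the end) by a single forward filter over the deduplicated input that keeps a perm unless it is a palindrome or its reverse was already kept (seen-set + output list).
import Mathlib
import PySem

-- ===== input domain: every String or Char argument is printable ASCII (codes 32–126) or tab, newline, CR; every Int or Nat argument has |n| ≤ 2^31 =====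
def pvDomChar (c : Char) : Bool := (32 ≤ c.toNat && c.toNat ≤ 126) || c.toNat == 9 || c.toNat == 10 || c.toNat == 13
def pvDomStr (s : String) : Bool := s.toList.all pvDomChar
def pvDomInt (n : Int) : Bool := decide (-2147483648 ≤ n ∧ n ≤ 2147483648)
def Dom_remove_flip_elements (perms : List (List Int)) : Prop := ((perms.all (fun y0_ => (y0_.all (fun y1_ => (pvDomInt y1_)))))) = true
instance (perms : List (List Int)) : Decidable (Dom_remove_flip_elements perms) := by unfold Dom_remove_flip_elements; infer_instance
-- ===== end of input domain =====

-- B replaces A's build-a-dict-then-prune-it-by-deleting-reverses with a single forward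
-- filter over the deduplicated input (seen-set + output list); same results, simpler.


-- ===== PORT A =====
def find_and_remove_flip (line : List Int) (lines : PySem.Dict (List Int) (List Int)) :
    PySem.Dict (List Int) (List Int) :=
  let reverse := (PySem.List.slice? line none none (-1)).getD []  -- line[::-1] (step -1 is never none)
  lines.erase reverse  -- 'del lines[reverse]' under try/except: delete if present, else no-op

def store_perms_in_dict (perms : List (List Int)) : PySem.Dict (List Int) (List Int) :=
  perms.foldl (fun new_perms perm => new_perms.insert perm perm) PySem.Dict.empty

def remove_flip_elements (perms : List (List Int)) : List (List Int) :=
  let perms_dict := store_perms_in_dict perms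
  -- for perm_value in list(perms_dict): …  ('count' is dead state, kept for fidelity)
  let st := perms_dict.keys.foldl
    (fun (st : PySem.Dict (List Int) (List Int) × Int) perm_value =>
      if st.1.contains perm_value then
        (find_and_remove_flip perm_value st.1, st.2 + 1)
      else st)
    (perms_dict, (0 : Int))
  st.1.values

-- ===== PORT B =====
def remove_flip_elements_alt (perms : List (List Int)) : List (List Int) :=
  let st := (PySem.List.dedup perms).foldl
    (fun (st : PySem.Set (List Int) × List (List Int)) perm =>
      let r := (PySem.List.slice? perm none none (-1)).getD []  -- perm[::-1]
      if r == perm || PySem.Set.contains st.1 r then st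
      else (PySem.Set.add st.1 perm, st.2 ++ [perm]))
    (PySem.Set.empty, [])
  st.2

-- ===== PRECONDITION & SPEC =====
def Spec_remove_flip_elements (perms : List (List Int)) (out : List (List Int)) : Prop := out = remove_flip_elements_alt perms
instance (perms : List (List Int)) (out : List (List Int)) : Decidable (Spec_remove_flip_elements perms out) := by unfold Spec_remove_flip_elements; infer_instance

-- ===== CLAIM (what is proved, stated in full; the proofs are below) =====
def Claim_equal_remove_flip_elements : Prop := ∀ (perms : List (List Int)), Dom_remove_flip_elements perms → Spec_remove_flip_elements perms (remove_flip_elements perms)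

-- ===== LEMMAS AND PROOFS =====

-- proof-side copies of the two loop bodies, on plain lists
def astepP (u : List (List Int)) (pv : List Int) : List (List Int) :=
  if u.contains pv then u.filter (fun k => !(k == pv.reverse)) else u

def bstepP (st : List (List Int) × List (List Int)) (p : List Int) :
    List (List Int) × List (List Int) :=
  if p.reverse == p || PySem.Set.contains st.1 p.reverse then st
  else (PySem.Set.add st.1 p, st.2 ++ [p])

def dup (k : List Int) : List Int × List Int := (k, k)

-- A's dict always maps k ↦ k; the dict loop is the list loop astepP
lemma contains_mk_dup (u : List (List Int)) (x : List Int) :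
    (PySem.Dict.mk (u.map dup)).contains x = u.contains x := by
  simp only [PySem.Dict.contains, List.any_map]
  have h : ((fun p : List Int × List Int => p.1 == x) ∘ dup) = fun k => k == x := rfl
  rw [h, List.any_beq']

lemma store_eq (l s : List (List Int)) :
    l.foldl (fun d p => d.insert p p) (PySem.Dict.mk (s.map dup))
      = PySem.Dict.mk ((l.foldl PySem.Set.add s).map dup) := by
  induction l generalizing s with
  | nil => simp
  | cons x l ih =>
    simp only [List.foldl_cons]
    have hx : (PySem.Dict.mk (s.map dup)).insert x x
        = PySem.Dict.mk ((PySem.Set.add s x).map dup) := by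
      by_cases h : s.contains x
      · rw [PySem.Dict.insert]
        simp only [contains_mk_dup, h, if_true, PySem.Set.add, PySem.Set.contains, if_true]
        congr 1
        rw [List.map_map]
        apply List.map_congr_left
        intro k _
        by_cases hk : k = x
        · simp [dup, hk, Function.comp]
        · simp [dup, hk, Function.comp]
      · rw [PySem.Dict.insert]
        rw [contains_mk_dup, if_neg (by simpa using h)]
        rw [PySem.Set.add, PySem.Set.contains, if_neg (by simpa using h)]
        simp [dup]
    rw [hx, ih]

lemma afold_eq (l u : List (List Int)) (c : Int) :
    (l.foldl
      (fun (st : PySem.Dict (List Int) (List Int) × Int) pv =>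
        if st.1.contains pv then (find_and_remove_flip pv st.1, st.2 + 1) else st)
      (PySem.Dict.mk (u.map dup), c)).1
    = PySem.Dict.mk ((l.foldl astepP u).map dup) := by
  induction l generalizing u c with
  | nil => simp
  | cons x l ih =>
    simp only [List.foldl_cons]
    by_cases h : u.contains x
    · rw [if_pos (by rw [contains_mk_dup]; exact h)]
      have hf : find_and_remove_flip x (PySem.Dict.mk (u.map dup))
          = PySem.Dict.mk ((u.filter (fun k => !(k == x.reverse))).map dup) := by
        rw [find_and_remove_flip]
        simp only [PySem.List.slice?_none_none_neg_one, Option.getD_some, PySem.Dict.erase]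
        congr 1
        rw [List.filter_map]
        rfl
      rw [hf, ih, astepP, if_pos h]
    · rw [if_neg (by rw [contains_mk_dup]; simpa using h)]
      rw [ih, astepP, if_neg h]

-- the loop invariant: after processing 'pre', B's seen equals its output, the output is an
-- in-order selection of 'pre', every dropped element was a palindrome or had its reverse kept,
-- and A's dict holds exactly the keys whose reverse was not yet processed or that were kept.
def Jpred (pre out : List (List Int)) (k : List Int) : Bool :=
  !(pre.contains k.reverse) || out.contains k

def LoopInv (full pre seen out u : List (List Int)) : Prop :=
  seen = out ∧ out.Sublist pre ∧
  (∀ k ∈ pre, k ∉ out → k.reverse = k ∨ k.reverse ∈ out) ∧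
  u = full.filter (Jpred pre out)

lemma step_inv (full pre suf : List (List Int)) (x : List Int)
    (hfull : pre ++ x :: suf = full) (hnd : full.Nodup)
    (seen out u : List (List Int)) (hinv : LoopInv full pre seen out u) :
    LoopInv full (pre ++ [x]) (bstepP (seen, out) x).1 (bstepP (seen, out) x).2 (astepP u x) := by
  obtain ⟨hseen, hsub, hC, hu⟩ := hinv
  rw [hseen]
  have hndfull := hnd
  rw [← hfull] at hndfull
  have hxpre : x ∉ pre := by
    intro hx
    exact (List.disjoint_of_nodup_append hndfull) hx (List.mem_cons_self ..)
  have hxfull : x ∈ full := by rw [← hfull]; simp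
  have houtpre : ∀ k, k ∈ out → k ∈ pre := fun k hk => hsub.mem hk
  have hxout : x ∉ out := fun h => hxpre (houtpre x h)
  by_cases hcond : (x.reverse == x || PySem.Set.contains out x.reverse) = true
  · -- B skips x
    rw [bstepP, if_pos hcond]
    refine ⟨rfl, hsub.trans (by simp), ?_, ?_⟩
    · intro k hk hko
      rcases List.mem_append.1 hk with hk | hk
      · exact hC k hk hko
      · simp only [List.mem_singleton] at hk
        subst hk
        rcases Bool.or_eq_true_iff.1 hcond with h | h
        · exact Or.inl (by simpa using h)
        · exact Or.inr (by simpa [PySem.Set.contains, List.contains_iff_mem] using h)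
    · rcases Bool.or_eq_true_iff.1 hcond with hpal | hseen
      · -- palindrome: A deletes x itself at x's turn
        have hpal' : x.reverse = x := by simpa using hpal
        have hxu : x ∈ u := by
          rw [hu, List.mem_filter]
          refine ⟨hxfull, ?_⟩
          simp only [Jpred, hpal', Bool.or_eq_true, Bool.not_eq_eq_eq_not, Bool.not_true,
            List.contains_iff_mem]
          left
          simpa using hxpre
        rw [astepP, if_pos (by simpa [List.contains_iff_mem] using hxu), hu, List.filter_filter]
        apply List.filter_congr
        intro k _
        by_cases hk : k = x
        · subst hk
          simp [Jpred, hpal', hxout, hxpre, List.contains_iff_mem]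
        · have hkr : k.reverse ≠ x := by
            intro h; apply hk; rw [← List.reverse_reverse k, h, hpal']
          have hkx : k ≠ x.reverse := by rw [hpal']; exact hk
          simp [Jpred, hk, hkr, hkx, List.contains_iff_mem]
      · -- x's reverse was already kept: A deleted x at that earlier turn
        have hrev : x.reverse ∈ out := by
          simpa [PySem.Set.contains, List.contains_iff_mem] using hseen
        have hxu : x ∉ u := by
          rw [hu, List.mem_filter]
          rintro ⟨-, hj⟩
          have hrevpre : x.reverse ∈ pre := houtpre _ hrev
          simp [Jpred, hrevpre, hxout, List.contains_iff_mem] at hj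
        rw [astepP, if_neg (by simpa [List.contains_iff_mem] using hxu), hu]
        apply List.filter_congr
        intro k _
        by_cases hk : k.reverse = x
        · have hk' : k = x.reverse := by rw [← hk, List.reverse_reverse]
          subst hk'
          simp [Jpred, hk, hrev, houtpre _ hrev, List.contains_iff_mem]
        · simp [Jpred, hk, List.contains_iff_mem]
  · -- B keeps x
    rw [bstepP, if_neg hcond]
    simp only [Bool.or_eq_true, not_or, Bool.not_eq_true] at hcond
    obtain ⟨hpal, hs⟩ := hcond
    have hpal' : x.reverse ≠ x := by simpa using hpal
    have hrevout : x.reverse ∉ out := by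
      simpa [PySem.Set.contains, List.contains_iff_mem] using hs
    have hrevpre : x.reverse ∉ pre := by
      intro hmem
      rcases hC _ hmem hrevout with h | h
      · rw [List.reverse_reverse] at h; exact hpal' h.symm
      · rw [List.reverse_reverse] at h; exact hxout h
    have hadd : PySem.Set.add out x = out ++ [x] := by
      rw [PySem.Set.add, PySem.Set.contains, if_neg (by simpa [List.contains_iff_mem] using hxout)]
    refine ⟨by simp [hadd], hsub.append (List.Sublist.refl _), ?_, ?_⟩
    · intro k hk hko
      simp only [hadd, List.mem_append, List.mem_singleton, not_or] at hko
      rcases List.mem_append.1 hk with hk | hk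
      · rcases hC k hk hko.1 with h | h
        · exact Or.inl h
        · exact Or.inr (by simp [hadd, h])
      · simp only [List.mem_singleton] at hk
        exact absurd hk hko.2
    · have hxu : x ∈ u := by
        rw [hu, List.mem_filter]
        refine ⟨hxfull, ?_⟩
        simp [Jpred, List.contains_iff_mem, hrevpre]
      rw [astepP, if_pos (by simpa [List.contains_iff_mem] using hxu), hu, List.filter_filter]
      apply List.filter_congr
      intro k _
      simp only [hadd]
      by_cases hk1 : k = x.reverse
      · subst hk1
        have : x.reverse ≠ x := hpal'
        simp [Jpred, List.contains_iff_mem, List.reverse_reverse, hrevout, this]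
      · by_cases hk2 : k = x
        · have h1 : k.reverse ∉ pre := by rw [hk2]; exact hrevpre
          have h2 : k ≠ x.reverse := by rw [hk2]; exact fun h => hpal' h.symm
          have h3 : k.reverse ≠ x := by rw [hk2]; exact hpal'
          simp only [Jpred, List.contains_iff_mem, hk2]
          have h4 : ¬ x = x.reverse := fun h => hpal' h.symm
          simp [hrevpre, hxout, h4]
        · have hkr : k.reverse ≠ x := by
            intro h; apply hk1; rw [← h, List.reverse_reverse]
          simp [Jpred, List.contains_iff_mem, hk1, hk2, hkr]

lemma run_inv (suf : List (List Int)) :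
    ∀ (pre full seen out u : List (List Int)), pre ++ suf = full → full.Nodup →
      LoopInv full pre seen out u →
      LoopInv full (pre ++ suf) (suf.foldl bstepP (seen, out)).1 (suf.foldl bstepP (seen, out)).2
        (suf.foldl astepP u) := by
  induction suf with
  | nil => intro pre full seen out u h hnd hinv; simpa using hinv
  | cons x suf ih =>
    intro pre full seen out u h hnd hinv
    have hstep := step_inv full pre suf x h hnd seen out u hinv
    have h' : (pre ++ [x]) ++ suf = full := by simpa using h
    have := ih (pre ++ [x]) full _ _ _ h' hnd hstep
    simpa using this

lemma filter_mem_of_sublist (l₁ l₂ : List (List Int)) (h : l₁.Sublist l₂) (hnd : l₂.Nodup) :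
    l₂.filter (fun k => decide (k ∈ l₁)) = l₁ := by
  induction h with
  | slnil => simp
  | cons b h ih =>
    rename_i l₁' l₂'
    have hnd' : l₂'.Nodup := hnd.of_cons
    have hb : b ∉ l₂' := (List.nodup_cons.1 hnd).1
    have hbl : b ∉ l₁' := fun hb' => hb (h.mem hb')
    rw [List.filter_cons, if_neg (by simpa using hbl)]
    exact ih hnd'
  | cons₂ b h ih =>
    rename_i l₁' l₂'
    have hnd' : l₂'.Nodup := hnd.of_cons
    have hb : b ∉ l₂' := (List.nodup_cons.1 hnd).1
    rw [List.filter_cons, if_pos (by simp)]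
    congr 1
    have hcg : ∀ k ∈ l₂', (decide (k ∈ b :: l₁') : Bool) = decide (k ∈ l₁') := by
      intro k hk
      have : k ≠ b := fun hkb => hb (hkb ▸ hk)
      simp [this]
    rw [List.filter_congr hcg]
    exact ih hnd'

-- B's port is the bstepP fold over the deduplicated input
lemma bport_eq (perms : List (List Int)) :
    remove_flip_elements_alt perms
      = ((PySem.List.dedup perms).foldl bstepP (PySem.Set.empty, [])).2 := by
  rw [remove_flip_elements_alt]
  have : (fun (st : PySem.Set (List Int) × List (List Int)) (perm : List Int) =>
      let r := (PySem.List.slice? perm none none (-1)).getD []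
      if r == perm || PySem.Set.contains st.1 r then st
      else (PySem.Set.add st.1 perm, st.2 ++ [perm])) = bstepP := by
    funext st p
    simp [bstepP, PySem.List.slice?_none_none_neg_one]
  rw [this]

-- A's port is the astepP fold over the deduplicated input, started at that same list
lemma aport_eq (perms : List (List Int)) :
    remove_flip_elements perms
      = ((PySem.List.dedup perms).foldl astepP (PySem.List.dedup perms)) := by
  rw [remove_flip_elements]
  have hstore : store_perms_in_dict perms
      = PySem.Dict.mk ((PySem.List.dedup perms).map dup) := by
    rw [store_perms_in_dict, PySem.List.dedup, PySem.Set.ofList_eq_foldl]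
    have := store_eq perms []
    simpa using this
  have hkeys : (PySem.Dict.mk ((PySem.List.dedup perms).map dup)).keys
      = PySem.List.dedup perms := by
    have h1 : ((fun x : List Int × List Int => x.1) ∘ dup) = id := rfl
    simp only [PySem.Dict.keys, List.map_map, h1, List.map_id]
  have h2 : ((fun x : List Int × List Int => x.2) ∘ dup) = id := rfl
  simp only [hstore, hkeys, afold_eq, PySem.Dict.values, List.map_map, h2, List.map_id]

-- ===== VERDICT (by name: the statement is the Claim_ definition above) =====
theorem remove_flip_elements_spec : Claim_equal_remove_flip_elements := by
  intro perms _
  unfold Spec_remove_flip_elements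
  rw [bport_eq, aport_eq]
  set ks := PySem.List.dedup perms with hks
  have hnd : ks.Nodup := by rw [hks, PySem.List.dedup]; exact PySem.Set.nodup_ofList perms
  have hinv0 : LoopInv ks [] [] [] ks := by
    refine ⟨rfl, List.nil_sublist _, by simp, ?_⟩
    rw [List.filter_congr (q := fun _ => true) (by intro k _; simp [Jpred])]
    simp
  have hrun := run_inv ks [] ks [] [] ks (by simp) hnd hinv0
  obtain ⟨-, hsub, hC, hu⟩ := hrun
  simp only [List.nil_append] at hsub hC hu
  rw [hu]
  have hpt : ∀ k ∈ ks, Jpred ks (ks.foldl bstepP ([], [])).2 k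
      = decide (k ∈ (ks.foldl bstepP ([], [])).2) := by
    intro k hk
    set out := (ks.foldl bstepP ([], [])).2
    by_cases hko : k ∈ out
    · simp [Jpred, List.contains_iff_mem, hko]
    · rcases hC k hk hko with h | h
      · have hmem : k.reverse ∈ ks := by rw [h]; exact hk
        simp [Jpred, List.contains_iff_mem, hko, hmem]
      · simp [Jpred, List.contains_iff_mem, hko, hsub.mem h]
  rw [List.filter_congr hpt]
  exact filter_mem_of_sublist _ _ hsub hnd
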